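-- pv_equiv track=rewrite | github.com/CASTvivian/local-ai-platform | core-platform/apps/desktop/bundle/backend/services/real_impl_service/main.py | pick_best_vision_model
-- ===== SOURCE A (Python) =====
-- def pick_best_vision_model(models: list[str], preferred: str | None = None) -> tuple[str | None, list[str]]:
--     ranked = []
--     for m in models:
--         name = m.lower()
--         score = 0
--         if preferred and preferred.lower() == name:
--             score = 1000
--         elif "qwen2.5-vl" in name or "qwen2.5vl" in name:
--             score = 100
--         elif "qwen3-vl" in name or "qwen3vl" in name:
--             score = 95
--         elif "llava" in name and "vision" in name:
--             score = 90
--         elif "llava" in name: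
--             score = 85
--         elif "vision" in name or "vl" in name:
--             score = 70
--         if score > 0:
--             ranked.append((score, m))
--     ranked.sort(key=lambda x: x[0], reverse=True)
--     return (ranked[0][1] if ranked else None), [x[1] for x in ranked]
-- ===== SOURCE B (Python) =====
-- def pick_best_vision_model(models: list[str], preferred: str | None = None) -> tuple[str | None, list[str]]:
--     def _score(m):
--         name = m.lower()
--         if preferred and preferred.lower() == name:
--             return 1000
--         if "qwen2.5-vl" in name or "qwen2.5vl" in name:
--             return 100
--         if "qwen3-vl" in name or "qwen3vl" in name:
--             return 95
--         if "llava" in name and "vision" in name: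
--             return 90
--         if "llava" in name:
--             return 85
--         if "vision" in name or "vl" in name:
--             return 70
--         return 0
--     scores = [_score(m) for m in models]
--     result = []
--     for s in (1000, 100, 95, 90, 85, 70):
--         result.extend(m for m, sc in zip(models, scores) if sc == s)
--     return (result[0] if result else None), result
-- ===== Notes on version B (the rewrite author's own statement) =====
-- stated objective: alternative
-- what changed: B drops A's (score, name) pair list and stable reverse sort entirely: it keeps the per-model scoring heuristic but groups models by the fixed score values, emitting one bucket pass per possible score (1000, 100, 95, 90, 85, 70) in descending order, which reproduces the stable-sort tie order by construction.
import Mathlib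
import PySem

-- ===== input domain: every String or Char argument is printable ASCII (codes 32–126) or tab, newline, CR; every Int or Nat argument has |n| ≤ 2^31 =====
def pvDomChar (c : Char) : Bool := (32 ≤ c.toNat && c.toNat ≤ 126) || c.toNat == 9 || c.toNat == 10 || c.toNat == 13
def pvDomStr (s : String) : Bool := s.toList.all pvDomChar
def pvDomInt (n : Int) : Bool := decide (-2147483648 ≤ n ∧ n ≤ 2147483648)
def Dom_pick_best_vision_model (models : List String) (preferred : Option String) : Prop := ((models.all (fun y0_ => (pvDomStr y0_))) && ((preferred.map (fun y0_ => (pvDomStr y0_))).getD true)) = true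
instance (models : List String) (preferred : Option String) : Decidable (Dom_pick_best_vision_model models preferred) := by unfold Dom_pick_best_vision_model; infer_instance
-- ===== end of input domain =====

-- B replaces A's build-pairs-and-stable-sort with six descending-score bucket passes
-- (group by the fixed score values, emit highest first); objective: alternative.

-- ===== PORT A =====
def pick_best_vision_model (models : List String) (preferred : Option String) : Option String × List String :=
  let ranked : List (Int × String) :=
    models.foldl (fun ranked m =>
      let name := PySem.Str.lower m
      let score : Int :=
        if (match preferred with
            | none => false
            | some p => (!(p == "")) && (PySem.Str.lower p == name)) then 1000
        else if PySem.Str.isIn "qwen2.5-vl" name || PySem.Str.isIn "qwen2.5vl" name then 100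
        else if PySem.Str.isIn "qwen3-vl" name || PySem.Str.isIn "qwen3vl" name then 95
        else if PySem.Str.isIn "llava" name && PySem.Str.isIn "vision" name then 90
        else if PySem.Str.isIn "llava" name then 85
        else if PySem.Str.isIn "vision" name || PySem.Str.isIn "vl" name then 70
        else 0
      if score > 0 then ranked ++ [(score, m)] else ranked) []
  let ranked2 := PySem.List.sorted ranked (fun x => x.1) true
  ((match ranked2 with | [] => none | x :: _ => some x.2), ranked2.map (fun x => x.2))

-- ===== PORT B =====
-- Source B's _score helper
def pvScore (preferred : Option String) (m : String) : Int :=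
  if (match preferred with
      | none => false
      | some p => (!(p == "")) && (PySem.Str.lower p == PySem.Str.lower m)) then 1000
  else if PySem.Str.isIn "qwen2.5-vl" (PySem.Str.lower m) || PySem.Str.isIn "qwen2.5vl" (PySem.Str.lower m) then 100
  else if PySem.Str.isIn "qwen3-vl" (PySem.Str.lower m) || PySem.Str.isIn "qwen3vl" (PySem.Str.lower m) then 95
  else if PySem.Str.isIn "llava" (PySem.Str.lower m) && PySem.Str.isIn "vision" (PySem.Str.lower m) then 90
  else if PySem.Str.isIn "llava" (PySem.Str.lower m) then 85
  else if PySem.Str.isIn "vision" (PySem.Str.lower m) || PySem.Str.isIn "vl" (PySem.Str.lower m) then 70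
  else 0

def pick_best_vision_model_alt (models : List String) (preferred : Option String) : Option String × List String :=
  let scores := models.map (pvScore preferred)
  let result :=
    [(1000 : Int), 100, 95, 90, 85, 70].foldl
      (fun acc s => acc ++ ((models.zip scores).filter (fun p => p.2 == s)).map (fun p => p.1)) []
  ((match result with | [] => none | m :: _ => some m), result)

-- ===== PRECONDITION & SPEC =====
def Spec_pick_best_vision_model (models : List String) (preferred : Option String) (out : Option String × List String) : Prop := out = pick_best_vision_model_alt models preferred
instance (models : List String) (preferred : Option String) (out : Option String × List String) : Decidable (Spec_pick_best_vision_model models preferred out) := by unfold Spec_pick_best_vision_model; infer_instance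

-- ===== CLAIM (what is proved, stated in full; the proofs are below) =====
def Claim_equal_pick_best_vision_model : Prop := ∀ (models : List String) (preferred : Option String), Dom_pick_best_vision_model models preferred → Spec_pick_best_vision_model models preferred (pick_best_vision_model models preferred)

-- ===== LEMMAS AND PROOFS =====

-- the bucket concatenation: elements of xs whose score is ss.head, then ss.tail's buckets
def pvBcat (ss : List Int) (xs : List (Int × String)) : List (Int × String) :=
  ss.flatMap (fun s => xs.filter (fun p => p.1 == s))

-- the flat form of A's ranked list
def pvRanked (preferred : Option String) (models : List String) : List (Int × String) :=
  models.flatMap (fun m => if pvScore preferred m > 0 then [(pvScore preferred m, m)] else [])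

lemma pvScore_mem (preferred : Option String) (m : String)
    (h : pvScore preferred m > 0) :
    pvScore preferred m ∈ ([1000, 100, 95, 90, 85, 70] : List Int) := by
  unfold pvScore at h ⊢
  split_ifs at h ⊢ <;> simp_all

lemma pvRanked_eq (preferred : Option String) (models : List String) (acc : List (Int × String)) :
    models.foldl (fun ranked m =>
      let name := PySem.Str.lower m
      let score : Int :=
        if (match preferred with
            | none => false
            | some p => (!(p == "")) && (PySem.Str.lower p == name)) then 1000
        else if PySem.Str.isIn "qwen2.5-vl" name || PySem.Str.isIn "qwen2.5vl" name then 100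
        else if PySem.Str.isIn "qwen3-vl" name || PySem.Str.isIn "qwen3vl" name then 95
        else if PySem.Str.isIn "llava" name && PySem.Str.isIn "vision" name then 90
        else if PySem.Str.isIn "llava" name then 85
        else if PySem.Str.isIn "vision" name || PySem.Str.isIn "vl" name then 70
        else 0
      if score > 0 then ranked ++ [(score, m)] else ranked) acc
    = acc ++ pvRanked preferred models := by
  induction models generalizing acc with
  | nil => simp [pvRanked]
  | cons m ms ih =>
    show List.foldl _ (if pvScore preferred m > 0 then acc ++ [(pvScore preferred m, m)] else acc) ms = _
    rw [ih]
    by_cases h : pvScore preferred m > 0 <;> simp [pvRanked, h]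

lemma insertBy_append_not {α : Type} (before : α → α → Bool) (x : α) (p q : List α)
    (h : ∀ y ∈ p, before x y = false) :
    PySem.List.insertBy before x (p ++ q) = p ++ PySem.List.insertBy before x q := by
  induction p with
  | nil => simp
  | cons y ys ih =>
    have hy : before x y = false := h y (by simp)
    simp only [List.cons_append, PySem.List.insertBy, hy]
    simp [ih (fun z hz => h z (by simp [hz]))]

lemma insertBy_all_before {α : Type} (before : α → α → Bool) (x : α) (q : List α)
    (h : ∀ y ∈ q, before x y = true) :
    PySem.List.insertBy before x q = x :: q := by
  cases q with
  | nil => rfl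
  | cons y ys => simp [PySem.List.insertBy, h y (by simp)]

lemma pvBcat_nil (ss : List Int) : pvBcat ss [] = [] := by simp [pvBcat]

lemma pvBcat_snoc_not_mem (ss : List Int) (xs : List (Int × String)) (x : Int × String)
    (h : x.1 ∉ ss) : pvBcat ss (xs ++ [x]) = pvBcat ss xs := by
  unfold pvBcat
  induction ss with
  | nil => simp
  | cons s ss ih =>
    have hs : ¬ (x.1 = s) := by intro hx; exact h (by simp [hx])
    have hx' : x.1 ∉ ss := fun hm => h (by simp [hm])
    rw [List.flatMap_cons, List.flatMap_cons, List.filter_append, ih hx']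
    simp [List.filter, show (x.1 == s) = false from by simp [hs]]

lemma pvBcat_mem_fst {ss : List Int} {xs : List (Int × String)} {y : Int × String}
    (h : y ∈ pvBcat ss xs) : y.1 ∈ ss := by
  unfold pvBcat at h
  simp only [List.mem_flatMap, List.mem_filter] at h
  obtain ⟨s, hs, _, hy⟩ := h
  simpa [show y.1 = s from by simpa using hy] using hs

lemma insert_pvBcat (x : Int × String) (ss : List Int) (hss : ss.Pairwise (· > ·))
    (hx : x.1 ∈ ss) (xs : List (Int × String)) :
    PySem.List.insertBy (fun a b => decide (b.1 < a.1)) x (pvBcat ss xs)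
      = pvBcat ss (xs ++ [x]) := by
  induction ss with
  | nil => simp at hx
  | cons s ss ih =>
    have hpair := (List.pairwise_cons.mp hss).1
    have hss' := (List.pairwise_cons.mp hss).2
    have hfil : ∀ y ∈ xs.filter (fun p => p.1 == s), (y : Int × String).1 = s := by
      intro y hy; simpa using (List.mem_filter.mp hy).2
    rcases List.mem_cons.mp hx with hxs | hxs
    · -- x belongs to the head bucket
      have h1 : ∀ y ∈ xs.filter (fun p => p.1 == s),
          (fun (a b : Int × String) => decide (b.1 < a.1)) x y = false := by
        intro y hy; simp [hfil y hy, hxs]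
      have h2 : ∀ y ∈ pvBcat ss xs,
          (fun (a b : Int × String) => decide (b.1 < a.1)) x y = true := by
        intro y hy
        have := hpair _ (pvBcat_mem_fst hy)
        simp [hxs]; omega
      have hnot : x.1 ∉ ss := by
        intro hmem; have := hpair _ hmem; omega
      show PySem.List.insertBy _ x (xs.filter (fun p => p.1 == s) ++ pvBcat ss xs) = _
      rw [insertBy_append_not _ _ _ _ h1, insertBy_all_before _ _ _ h2]
      show _ = (xs ++ [x]).filter (fun p => p.1 == s) ++ pvBcat ss (xs ++ [x])
      rw [pvBcat_snoc_not_mem _ _ _ hnot]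
      simp [List.filter_append, List.filter, hxs]
    · -- x belongs to a later bucket
      have hlt : x.1 < s := hpair _ hxs
      have h1 : ∀ y ∈ xs.filter (fun p => p.1 == s),
          (fun (a b : Int × String) => decide (b.1 < a.1)) x y = false := by
        intro y hy; simp [hfil y hy]; omega
      have hne : ¬ (x.1 = s) := by omega
      show PySem.List.insertBy _ x (xs.filter (fun p => p.1 == s) ++ pvBcat ss xs) = _
      rw [insertBy_append_not _ _ _ _ h1, ih hss' hxs]
      show _ = (xs ++ [x]).filter (fun p => p.1 == s) ++ pvBcat ss (xs ++ [x])
      simp [List.filter_append, List.filter, show (x.1 == s) = false from by simp [hne]]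

lemma foldl_insert_pvBcat (ss : List Int) (hss : ss.Pairwise (· > ·))
    (xs : List (Int × String)) (h : ∀ p ∈ xs, p.1 ∈ ss) (ys : List (Int × String)) :
    xs.foldl (fun acc x => PySem.List.insertBy (fun a b => decide (b.1 < a.1)) x acc) (pvBcat ss ys)
      = pvBcat ss (ys ++ xs) := by
  induction xs generalizing ys with
  | nil => simp
  | cons x xs ih =>
    simp only [List.foldl_cons]
    rw [insert_pvBcat x ss hss (h x (by simp)) ys,
        ih (fun p hp => h p (by simp [hp])) (ys ++ [x])]
    simp

lemma sorted_eq_pvBcat (xs : List (Int × String))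
    (h : ∀ p ∈ xs, p.1 ∈ ([1000, 100, 95, 90, 85, 70] : List Int)) :
    PySem.List.sorted xs (fun x => x.1) true = pvBcat [1000, 100, 95, 90, 85, 70] xs := by
  rw [PySem.List.sorted_rev_eq_foldl_insertBy]
  have h0 := foldl_insert_pvBcat [1000, 100, 95, 90, 85, 70] (by decide) xs h []
  rw [pvBcat_nil] at h0
  simpa using h0

lemma filter_pvRanked (preferred : Option String) (models : List String) (s : Int) (hs : 0 < s) :
    (pvRanked preferred models).filter (fun p => p.1 == s)
      = (models.filter (fun m => pvScore preferred m == s)).map (fun m => (pvScore preferred m, m)) := by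
  induction models with
  | nil => simp [pvRanked]
  | cons m ms ih =>
    unfold pvRanked at *
    simp only [List.flatMap_cons, List.filter_append, List.filter_cons, ih]
    by_cases h : pvScore preferred m = s
    · have h0 : pvScore preferred m > 0 := by omega
      simp [h, hs]
    · by_cases h2 : pvScore preferred m > 0 <;> simp [h2, List.filter, h]

lemma zip_map_filter (f : String → Int) (s : Int) (models : List String) :
    (((models.zip (models.map f)).filter (fun p => p.2 == s)).map (fun p => p.1))
      = models.filter (fun m => f m == s) := by
  induction models with
  | nil => rfl
  | cons m ms ih =>
    simp only [List.map_cons, List.zip_cons_cons, List.filter_cons]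
    by_cases h : f m = s <;> simp [h, ih]

lemma foldl_append_f {α β : Type} (ss : List α) (f : α → List β) (acc : List β) :
    ss.foldl (fun acc s => acc ++ f s) acc = acc ++ ss.flatMap f := by
  induction ss generalizing acc with
  | nil => simp
  | cons s ss ih => simp [ih]

-- ===== VERDICT (by name: the statement is the Claim_ definition above) =====
theorem pick_best_vision_model_spec : Claim_equal_pick_best_vision_model := by
  intro models preferred _
  show pick_best_vision_model models preferred = pick_best_vision_model_alt models preferred
  unfold pick_best_vision_model pick_best_vision_model_alt
  rw [pvRanked_eq preferred models []]
  simp only [List.nil_append]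
  have hmem : ∀ p ∈ pvRanked preferred models, p.1 ∈ ([1000, 100, 95, 90, 85, 70] : List Int) := by
    intro p hp
    unfold pvRanked at hp
    simp only [List.mem_flatMap] at hp
    obtain ⟨m, _, hm⟩ := hp
    by_cases h : pvScore preferred m > 0
    · simp [h] at hm
      subst hm
      exact pvScore_mem preferred m h
    · simp [h] at hm
  rw [sorted_eq_pvBcat _ hmem]
  have hzip : (fun (acc : List String) (s : Int) =>
        acc ++ ((models.zip (models.map (pvScore preferred))).filter (fun p => p.2 == s)).map (fun p => p.1))
      = (fun acc s => acc ++ models.filter (fun m => pvScore preferred m == s)) := by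
    funext acc s
    rw [zip_map_filter]
  rw [hzip]
  have hres : (pvBcat [1000, 100, 95, 90, 85, 70] (pvRanked preferred models)).map (fun x => x.2)
      = [(1000 : Int), 100, 95, 90, 85, 70].foldl
          (fun acc s => acc ++ models.filter (fun m => pvScore preferred m == s)) [] := by
    rw [foldl_append_f]
    have e : ∀ s : Int, 0 < s →
        ((pvRanked preferred models).filter (fun p => p.1 == s)).map (fun x => x.2)
          = models.filter (fun m => pvScore preferred m == s) := by
      intro s hs
      rw [filter_pvRanked preferred models s hs]
      simp [Function.comp_def]
    unfold pvBcat
    simp only [List.flatMap_cons, List.flatMap_nil, List.map_append, List.append_nil,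
      List.nil_append]
    rw [e 1000 (by norm_num), e 100 (by norm_num), e 95 (by norm_num), e 90 (by norm_num),
      e 85 (by norm_num), e 70 (by norm_num)]
  cases hb : pvBcat [1000, 100, 95, 90, 85, 70] (pvRanked preferred models) with
  | nil =>
    rw [hb] at hres
    simp only [List.map_nil] at hres
    rw [← hres]
    rfl
  | cons x t =>
    rw [hb] at hres
    rw [← hres]
    simp
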